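-- pv_equiv track=rewrite | github.com/Krout0n/WIN-ICPC | aoj/ITP1/5_B.py | build_line
-- ===== SOURCE A (Python) =====
-- def build_line(width, i, h):
--     s = ''
--     if i == 0 or i == h-1:
--         while len(s) < width:
--                 s += '#'
--     else:
--         s += '#'
--         while len(s) < width - 1:
--             s += '.'
--         s += '#'
--     return s
-- ===== SOURCE B (Python) =====
-- def build_line(width, i, h):
--     if i == 0 or i == h - 1:
--         return '#' * width
--     return '#' + '.' * (width - 2) + '#'
-- ===== Notes on version B (the rewrite author's own statement) =====
-- stated objective: idiomatic
-- what changed: Replaced the char-by-char while-loop accumulation with closed-form string repetition/concatenation ('#'*width, '#'+'.'*(width-2)+'#').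
import Mathlib
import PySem

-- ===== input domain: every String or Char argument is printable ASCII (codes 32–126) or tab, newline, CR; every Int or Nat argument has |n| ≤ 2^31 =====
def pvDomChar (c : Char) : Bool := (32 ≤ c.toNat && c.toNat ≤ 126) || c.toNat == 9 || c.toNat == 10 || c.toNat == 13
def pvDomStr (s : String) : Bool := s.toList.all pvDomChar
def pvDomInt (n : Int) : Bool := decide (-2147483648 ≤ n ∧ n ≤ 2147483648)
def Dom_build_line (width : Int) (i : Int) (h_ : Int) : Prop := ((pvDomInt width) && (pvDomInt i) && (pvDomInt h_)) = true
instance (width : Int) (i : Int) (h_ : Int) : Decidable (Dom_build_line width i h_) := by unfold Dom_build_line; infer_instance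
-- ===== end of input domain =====

-- B replaces A's char-by-char while-loop accumulation with closed-form string repetition (idiomatic).


-- ===== PORT A =====
-- while len(s) < bound: s += c   (char-by-char accumulation, exact transliteration)
def padLoop (s : List Char) (bound : Int) (c : Char) : List Char :=
  if (s.length : Int) < bound then padLoop (s ++ [c]) bound c else s
termination_by (bound - s.length).toNat
decreasing_by simp; omega

def build_line (width : Int) (i : Int) (h_ : Int) : String :=
  if i = 0 ∨ i = h_ - 1 then
    String.mk (padLoop [] width '#')
  else
    String.mk ((padLoop ['#'] (width - 1) '.') ++ ['#'])

-- ===== PORT B =====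
-- '#' * width  and  '#' + '.' * (width-2) + '#' ; Python's s*n is '' for n ≤ 0, = replicate n.toNat
def build_line_alt (width : Int) (i : Int) (h_ : Int) : String :=
  if i = 0 ∨ i = h_ - 1 then
    String.mk (List.replicate width.toNat '#')
  else
    String.mk ('#' :: List.replicate (width - 2).toNat '.' ++ ['#'])

-- ===== PRECONDITION & SPEC =====
def Spec_build_line (width : Int) (i : Int) (h_ : Int) (out : String) : Prop := out = build_line_alt width i h_
instance (width : Int) (i : Int) (h_ : Int) (out : String) : Decidable (Spec_build_line width i h_ out) := by unfold Spec_build_line; infer_instance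

-- ===== CLAIM (what is proved, stated in full; the proofs are below) =====
def Claim_equal_build_line : Prop := ∀ (width : Int) (i : Int) (h_ : Int), Dom_build_line width i h_ → Spec_build_line width i h_ (build_line width i h_)

-- ===== LEMMAS AND PROOFS =====
theorem padLoop_eq (s : List Char) (bound : Int) (c : Char) :
    padLoop s bound c = s ++ List.replicate (bound - s.length).toNat c := by
  fun_induction padLoop s bound c with
  | case1 s h ih =>
    rw [ih]
    have h1 : (bound - s.length).toNat = (bound - (s ++ [c]).length).toNat + 1 := by
      simp; omega
    rw [h1, List.replicate_succ, List.append_assoc]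
    rfl
  | case2 s h =>
    have : (bound - s.length).toNat = 0 := by omega
    simp [this]

-- ===== VERDICT (by name: the statement is the Claim_ definition above) =====
theorem build_line_spec : Claim_equal_build_line := by
  intro width i h_ _
  unfold Spec_build_line build_line build_line_alt
  split
  · rw [padLoop_eq]; simp
  · rw [padLoop_eq]
    have : (width - 1 - (['#'] : List Char).length).toNat = (width - 2).toNat := by
      simp; omega
    rw [this]; simp
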